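-- pv_equiv track=rewrite | github.com/minhquana1906/Algorithm | TTUD_HK5/GiaiDe/BT_Chuong2/Queue/13_SumOfMaxAndMinInWindowK.py | sum_min_max_windows
-- ===== SOURCE A (Python) =====
-- def sum_min_max_windows(arr, k):
--     n = len(arr)
--     if n < k:
--         return 0
--
--     total_sum = 0
--
--     # Process each window of size k
--     for i in range(n - k + 1):
--         # Get current window
--         window = arr[i : i + k]
--         # Find min and max
--         window_sum = min(window) + max(window)
--         total_sum += window_sum
--
--     return total_sum
-- ===== SOURCE B (Python) =====
-- def sum_min_max_windows(arr, k):
--     n = len(arr)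
--     if k < 1 or n < k:
--         return 0
--     maxq = []  # indices, values strictly increasing from newest (end) ... stored oldest-first
--     minq = []
--     mxh = 0  # head pointers: the live deques are maxq[mxh:], minq[mnh:]
--     mnh = 0
--     total = 0
--     for i in range(n):
--         v = arr[i]
--         while len(maxq) > mxh and arr[maxq[-1]] <= v:
--             maxq.pop()
--         maxq.append(i)
--         while len(minq) > mnh and v <= arr[minq[-1]]:
--             minq.pop()
--         minq.append(i)
--         if maxq[mxh] == i - k:
--             mxh += 1
--         if minq[mnh] == i - k:
--             mnh += 1
--         if k - 1 <= i:
--             total += arr[minq[mnh]] + arr[maxq[mxh]]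
--     return total
-- ===== Notes on version B (the rewrite author's own statement) =====
-- stated objective: faster
-- what changed: A rescans every k-slice with min()/max(); B makes a single pass keeping two monotonic index deques (head-pointer lists) whose fronts are the window minimum and maximum.
import Mathlib
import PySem

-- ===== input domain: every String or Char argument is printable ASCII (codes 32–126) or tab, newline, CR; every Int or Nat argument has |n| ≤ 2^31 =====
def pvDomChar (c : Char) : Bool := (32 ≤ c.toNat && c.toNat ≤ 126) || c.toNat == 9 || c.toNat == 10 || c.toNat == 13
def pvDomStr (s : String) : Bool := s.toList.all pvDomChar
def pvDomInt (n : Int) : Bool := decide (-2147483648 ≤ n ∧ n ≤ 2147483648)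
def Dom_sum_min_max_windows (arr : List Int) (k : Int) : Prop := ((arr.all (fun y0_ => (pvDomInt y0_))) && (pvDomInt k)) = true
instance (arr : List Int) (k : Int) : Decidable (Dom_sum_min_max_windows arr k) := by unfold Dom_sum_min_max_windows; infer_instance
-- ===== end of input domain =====

-- B replaces A's per-window min()/max() rescans by two monotonic index deques, one pass; equivalence of RETURN values is proved on Pre_ (k ≥ 1).

-- ===== PORT A =====
def sum_min_max_windows (arr : List Int) (k : Int) : Int :=
  let n : Int := arr.length
  if n < k then 0
  else
    (PySem.List.pyRange 0 (n - k + 1) 1).foldl (fun total i =>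
      let window := PySem.List.slice arr (some i) (some (i + k))
      -- min(window) + max(window): total forms, exact since window ≠ [] under Pre_
      total + (((PySem.List.min? window (fun x => x)).getD 0) + ((PySem.List.max? window (fun x => x)).getD 0))) 0

-- ===== PORT B =====
-- the two 'while … pop()' loops of Source B (generic in the comparison, used for both deques)
def pvPopWhile (p : Nat → Bool) : List Nat → List Nat
  | [] => []
  | j :: rest => if p j then pvPopWhile p rest else j :: rest

-- one iteration of Source B's for-loop; deques hold indices newest-first (python appends/pops at
-- the list end = our head, and advances a head pointer = our dropLast / getLast).
-- Source B compares maxq[mxh] == i - k over ℤ; with ℕ indices that is the guarded 'kn ≤ i ∧ … = i - kn'.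
def pvStep (arr : List Int) (kn : Nat) (st : List Nat × List Nat × Int) (i : Nat) :
    List Nat × List Nat × Int :=
  let v := arr.getD i 0
  let maxq := i :: pvPopWhile (fun j => decide (arr.getD j 0 ≤ v)) st.1
  let minq := i :: pvPopWhile (fun j => decide (v ≤ arr.getD j 0)) st.2.1
  let maxq := if kn ≤ i ∧ maxq.getLast? = some (i - kn) then maxq.dropLast else maxq
  let minq := if kn ≤ i ∧ minq.getLast? = some (i - kn) then minq.dropLast else minq
  let total := if kn - 1 ≤ i then st.2.2 + (arr.getD (minq.getLastD 0) 0 + arr.getD (maxq.getLastD 0) 0)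
               else st.2.2
  (maxq, minq, total)

def sum_min_max_windows_alt (arr : List Int) (k : Int) : Int :=
  if k < 1 ∨ (arr.length : Int) < k then 0
  else ((List.range arr.length).foldl (pvStep arr k.toNat) ([], [], 0)).2.2

-- ===== PRECONDITION & SPEC =====
-- Pre_ excludes k ≤ 0, on which A always raises ValueError (min() of an empty window slice).
def Pre_sum_min_max_windows (arr : List Int) (k : Int) : Prop := 1 ≤ k
instance (arr : List Int) (k : Int) : Decidable (Pre_sum_min_max_windows arr k) := by unfold Pre_sum_min_max_windows; infer_instance
def pvWitness_sum_min_max_windows : List Int × Int := ([3, -1, 4, 1, 5], 2)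

def Spec_sum_min_max_windows (arr : List Int) (k : Int) (out : Int) : Prop := out = sum_min_max_windows_alt arr k
instance (arr : List Int) (k : Int) (out : Int) : Decidable (Spec_sum_min_max_windows arr k out) := by unfold Spec_sum_min_max_windows; infer_instance

-- ===== CLAIM (what is proved, stated in full; the proofs are below) =====
def Claim_equal_sum_min_max_windows : Prop := ∀ (arr : List Int) (k : Int), Dom_sum_min_max_windows arr k → Pre_sum_min_max_windows arr k → Spec_sum_min_max_windows arr k (sum_min_max_windows arr k)

-- ===== LEMMAS AND PROOFS =====

-- dominance predicate: j is a "record from the right" among the first m processed indices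
def pvRecB (f : Nat → Int) (m j : Nat) : Bool := (List.range' (j+1) (m - 1 - j)).all (fun m' => decide (f m' < f j))

-- the deque state after processing indices 0..m-1 with window size kn, newest-first
def pvQS (f : Nat → Int) (kn m : Nat) : List Nat :=
  ((List.range' (m - kn) (m - (m - kn))).filter (fun j => pvRecB f m j)).reverse

-- running total after processing indices 0..m-1
def pvT (arr : List Int) (kn m : Nat) : Int :=
  ((List.range (m + 1 - kn)).map (fun s =>
    ((PySem.List.min? ((arr.drop s).take kn) (fun x => x)).getD 0) +
    ((PySem.List.max? ((arr.drop s).take kn) (fun x => x)).getD 0))).sum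

lemma mem_pvQS (f : Nat → Int) (kn m j : Nat) :
    j ∈ pvQS f kn m ↔ (m - kn ≤ j ∧ j < m ∧ ∀ m', j < m' → m' < m → f m' < f j) := by
  unfold pvQS pvRecB
  simp only [List.mem_reverse, List.mem_filter, List.mem_range', List.all_eq_true, decide_eq_true_eq]
  constructor
  · rintro ⟨⟨c, hc1, hc2⟩, hall⟩
    refine ⟨by omega, by omega, ?_⟩
    intro m' h1 h2
    exact hall m' ⟨m' - (j+1), by omega, by omega⟩
  · rintro ⟨h1, h2, hall⟩
    refine ⟨⟨j - (m - kn), by omega, by omega⟩, ?_⟩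
    rintro m' ⟨c, hc1, hc2⟩
    exact hall m' (by omega) (by omega)

lemma pairwise_pvQS (f : Nat → Int) (kn m : Nat) :
    (pvQS f kn m).Pairwise (fun a b => b < a ∧ f a < f b) := by
  have hp : (List.range' (m-kn) (m-(m-kn))).Pairwise (· < ·) := List.pairwise_lt_range' ..
  have hf : ((List.range' (m-kn) (m-(m-kn))).filter (fun j => pvRecB f m j)).Pairwise (· < ·) :=
    List.Pairwise.sublist List.filter_sublist hp
  unfold pvQS
  rw [List.pairwise_reverse]
  refine List.Pairwise.imp_of_mem ?_ hf
  intro a b ha hb hab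
  refine ⟨hab, ?_⟩
  have hma : a ∈ pvQS f kn m := by unfold pvQS; simp only [List.mem_reverse]; exact ha
  have hmb : b ∈ pvQS f kn m := by unfold pvQS; simp only [List.mem_reverse]; exact hb
  rw [mem_pvQS] at hma hmb
  exact hma.2.2 b hab hmb.2.1

lemma popWhile_eq_filter (f : Nat → Int) (v : Int) (l : List Nat)
    (h : l.Pairwise (fun a b => f a < f b)) :
    pvPopWhile (fun j => decide (f j ≤ v)) l = l.filter (fun j => decide (v < f j)) := by
  induction l with
  | nil => rfl
  | cons j rest ih =>
    rw [List.pairwise_cons] at h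
    by_cases hj : f j ≤ v
    · simp [pvPopWhile, List.filter, hj, not_lt.mpr hj, ih h.2]
    · push Not at hj
      have : rest.filter (fun j => decide (v < f j)) = rest :=
        List.filter_eq_self.mpr (fun a ha => by simp; exact lt_trans hj (h.1 a ha))
      simp [pvPopWhile, List.filter, hj, not_le.mpr hj, this]

-- deque after push at step i, before expiry: window [i-kn, i], dominance at i
def pvQP (f : Nat → Int) (kn i : Nat) : List Nat :=
  ((List.range' (i - kn) (i + 1 - (i - kn))).filter (fun j => pvRecB f (i+1) j)).reverse

lemma push_pvQS (f : Nat → Int) (kn i : Nat) :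
    i :: (pvQS f kn i).filter (fun j => decide (f i < f j)) = pvQP f kn i := by
  unfold pvQS pvQP
  have hlo : i - kn ≤ i := Nat.sub_le _ _
  have h1 : i + 1 - (i - kn) = (i - (i - kn)) + 1 := by omega
  rw [h1, List.range'_1_concat]
  have h2 : i - kn + (i - (i - kn)) = i := by omega
  rw [h2]
  rw [List.filter_append]
  have hDi : pvRecB f (i+1) i = true := by unfold pvRecB; simp
  rw [← List.filter_reverse]
  simp only [List.filter_cons, hDi, List.filter_nil, List.reverse_append]
  simp only [List.filter_reverse]
  congr 1
  rw [List.filter_filter]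
  show _ = (List.filter (fun j => pvRecB f (i+1) j) (List.range' (i - kn) (i - (i - kn)))).reverse
  congr 1
  refine List.filter_congr ?_
  intro j hj
  rw [List.mem_range'] at hj
  obtain ⟨c, hc1, hc2⟩ := hj
  have hji : j < i := by omega
  unfold pvRecB
  have h3 : i + 1 - 1 - j = (i - 1 - j) + 1 := by omega
  rw [h3, List.range'_1_concat]
  have h4 : j + 1 + (i - 1 - j) = i := by omega
  rw [h4, List.all_append]
  simp [Bool.and_comm]

lemma expire_pvQS (f : Nat → Int) (kn i : Nat) (hkn : 1 ≤ kn) :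
    (if kn ≤ i ∧ (pvQP f kn i).getLast? = some (i - kn) then (pvQP f kn i).dropLast
     else pvQP f kn i) = pvQS f kn (i+1) := by
  by_cases hki : kn ≤ i
  · -- full window: lo = i - kn, the range is lo :: range' (lo+1) kn
    have h1 : i + 1 - (i - kn) = kn + 1 := by omega
    have h2 : i + 1 - kn = (i - kn) + 1 := by omega
    have h3 : i + 1 - (i - kn + 1) = kn := by omega
    unfold pvQP pvQS
    rw [h1, h2, h3, List.range'_succ]
    by_cases hD : pvRecB f (i+1) (i - kn) = true
    · rw [List.filter_cons_of_pos hD, List.reverse_cons]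
      have hlast : ((List.filter (fun j => pvRecB f (i+1) j) (List.range' (i - kn + 1) kn)).reverse ++ [i - kn]).getLast? = some (i - kn) := by
        simp
      rw [if_pos ⟨hki, hlast⟩, List.dropLast_concat]
    · rw [List.filter_cons_of_neg (by simpa using hD)]
      rw [if_neg ?_]
      rintro ⟨-, hlast⟩
      rw [List.getLast?_reverse] at hlast
      have hmem : i - kn ∈ List.filter (fun j => pvRecB f (i+1) j) (List.range' (i - kn + 1) kn) :=
        List.mem_of_mem_head? (by rw [hlast]; rfl)
      have := List.mem_range'.mp (List.mem_of_mem_filter hmem)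
      omega
  · -- growing window: nothing expires and lo stays 0
    have h1 : i - kn = 0 := by omega
    have h2 : i + 1 - kn = 0 := by omega
    rw [if_neg (by rintro ⟨h, -⟩; omega)]
    unfold pvQP pvQS
    rw [h1, h2]

lemma last_mem_pvQS (f : Nat → Int) (kn m : Nat) (hkn : 1 ≤ kn) (hm : 1 ≤ m) :
    (pvQS f kn m).getLastD 0 ∈ pvQS f kn m ∧
    ∀ j ∈ pvQS f kn m, (pvQS f kn m).getLastD 0 ≤ j := by
  have hne : m - 1 ∈ pvQS f kn m := by
    rw [mem_pvQS]; exact ⟨by omega, by omega, fun m' h1 h2 => by omega⟩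
  unfold pvQS at *
  set F := (List.range' (m - kn) (m - (m - kn))).filter (fun j => pvRecB f m j) with hF
  have hFP : F.Pairwise (· < ·) :=
    List.Pairwise.sublist List.filter_sublist (List.pairwise_lt_range' ..)
  cases hFe : F with
  | nil => rw [hFe] at hne; simp at hne
  | cons a t =>
    have hhead : ((a :: t).reverse).getLastD 0 = a := by
      rw [List.getLastD_eq_getLast?, List.getLast?_reverse]; rfl
    rw [hhead]
    constructor
    · rw [List.mem_reverse]; exact List.mem_cons_self ..
    · intro j hj
      rw [List.mem_reverse] at hj
      rw [List.mem_cons] at hj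
      rcases hj with h | h
      · omega
      · have := (List.pairwise_cons.mp (hFe ▸ hFP)).1 j h
        omega

lemma front_pvQS (f : Nat → Int) (kn m : Nat) (hkn : 1 ≤ kn) (hm : 1 ≤ m) :
    ((m - kn ≤ (pvQS f kn m).getLastD 0 ∧ (pvQS f kn m).getLastD 0 < m) ∧
     ∀ j, m - kn ≤ j → j < m → f j ≤ f ((pvQS f kn m).getLastD 0)) := by
  obtain ⟨hmem, hmin⟩ := last_mem_pvQS f kn m hkn hm
  set j0 := (pvQS f kn m).getLastD 0 with hj0
  have hj0w := (mem_pvQS f kn m j0).mp hmem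
  refine ⟨⟨hj0w.1, hj0w.2.1⟩, ?_⟩
  have main : ∀ d j, m - j ≤ d → m - kn ≤ j → j < m → f j ≤ f j0 := by
    intro d
    induction d with
    | zero => intro j h1 h2 h3; omega
    | succ d ih =>
      intro j h1 h2 h3
      by_cases hj : j ∈ pvQS f kn m
      · rcases Nat.lt_or_ge j0 j with hlt | hge
        · exact le_of_lt (hj0w.2.2 j hlt h3)
        · have := hmin j hj
          have : j = j0 := by omega
          rw [this]
      · rw [mem_pvQS] at hj
        push Not at hj
        obtain ⟨m', hm1, hm2, hm3⟩ := hj h2 h3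
        exact le_trans hm3 (ih m' (by omega) (by omega) hm2)
  exact fun j h2 h3 => main (m - j) j le_rfl h2 h3

lemma mem_window (arr : List Int) (s kn : Nat) (hs : s + kn ≤ arr.length) (x : Int) :
    x ∈ (arr.drop s).take kn ↔ ∃ j, s ≤ j ∧ j < s + kn ∧ arr.getD j 0 = x := by
  rw [List.mem_iff_getElem]
  constructor
  · rintro ⟨t, ht, rfl⟩
    have ht' : t < kn := by
      have := ht; simp [List.length_take, List.length_drop] at this; omega
    refine ⟨s + t, by omega, by omega, ?_⟩
    rw [List.getElem_take, List.getElem_drop]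
    rw [List.getD_eq_getElem?_getD, List.getElem?_eq_getElem (by omega)]
    rfl
  · rintro ⟨j, h1, h2, rfl⟩
    refine ⟨j - s, by simp [List.length_take, List.length_drop]; omega, ?_⟩
    rw [List.getElem_take, List.getElem_drop]
    rw [List.getD_eq_getElem?_getD, List.getElem?_eq_getElem (by omega)]
    congr 2
    omega

lemma window_ne_nil (arr : List Int) (s kn : Nat) (hkn : 1 ≤ kn) (hs : s + kn ≤ arr.length) :
    (arr.drop s).take kn ≠ [] := by
  have : ((arr.drop s).take kn).length = kn := by
    simp [List.length_take, List.length_drop]; omega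
  intro h
  rw [h] at this
  simp at this
  omega

-- A's max(window) equals the value at the front of B's max-deque
lemma max_window_eq (arr : List Int) (kn m : Nat) (hkn : 1 ≤ kn) (hm : kn ≤ m)
    (hlen : m ≤ arr.length) :
    ((PySem.List.max? ((arr.drop (m - kn)).take kn) (fun x => x)).getD 0)
      = arr.getD ((pvQS (fun j => arr.getD j 0) kn m).getLastD 0) 0 := by
  set s := m - kn with hs
  have hsm : s + kn = m := by omega
  have hwle : s + kn ≤ arr.length := by omega
  obtain ⟨⟨hb1, hb2⟩, hfr⟩ := front_pvQS (fun j => arr.getD j 0) kn m hkn (by omega)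
  set j0 := (pvQS (fun j => arr.getD j 0) kn m).getLastD 0 with hj0
  obtain ⟨M, hM⟩ : ∃ M, PySem.List.max? ((arr.drop s).take kn) (fun x => x) = some M := by
    cases hx : PySem.List.max? ((arr.drop s).take kn) (fun x => x) with
    | none => exact absurd ((PySem.List.max?_eq_none_iff _ _).mp hx) (window_ne_nil arr s kn hkn hwle)
    | some M => exact ⟨M, rfl⟩
  rw [hM]
  have hMmem := PySem.List.max?_mem hM
  have hMmax := PySem.List.max?_isMax hM
  have h1 : M ≤ arr.getD j0 0 := by
    obtain ⟨j, hj1, hj2, hj3⟩ := (mem_window arr s kn hwle M).mp hMmem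
    rw [← hj3]
    exact hfr j (by omega) (by omega)
  have h2 : arr.getD j0 0 ≤ M :=
    hMmax _ ((mem_window arr s kn hwle _).mpr ⟨j0, by omega, by omega, rfl⟩)
  exact le_antisymm h1 h2

-- A's min(window) equals the value at the front of B's min-deque (negated comparisons)
lemma min_window_eq (arr : List Int) (kn m : Nat) (hkn : 1 ≤ kn) (hm : kn ≤ m)
    (hlen : m ≤ arr.length) :
    ((PySem.List.min? ((arr.drop (m - kn)).take kn) (fun x => x)).getD 0)
      = arr.getD ((pvQS (fun j => -(arr.getD j 0)) kn m).getLastD 0) 0 := by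
  set s := m - kn with hs
  have hwle : s + kn ≤ arr.length := by omega
  obtain ⟨⟨hb1, hb2⟩, hfr⟩ := front_pvQS (fun j => -(arr.getD j 0)) kn m hkn (by omega)
  set j0 := (pvQS (fun j => -(arr.getD j 0)) kn m).getLastD 0 with hj0
  obtain ⟨M, hM⟩ : ∃ M, PySem.List.min? ((arr.drop s).take kn) (fun x => x) = some M := by
    cases hx : PySem.List.min? ((arr.drop s).take kn) (fun x => x) with
    | none => exact absurd ((PySem.List.min?_eq_none_iff _ _).mp hx) (window_ne_nil arr s kn hkn hwle)
    | some M => exact ⟨M, rfl⟩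
  rw [hM]
  have hMmem := PySem.List.min?_mem hM
  have hMmin := PySem.List.min?_isMin hM
  have h1 : arr.getD j0 0 ≤ M := by
    obtain ⟨j, hj1, hj2, hj3⟩ := (mem_window arr s kn hwle M).mp hMmem
    rw [← hj3]
    have := hfr j (by omega) (by omega)
    omega
  have h2 : M ≤ arr.getD j0 0 :=
    hMmin _ ((mem_window arr s kn hwle _).mpr ⟨j0, by omega, by omega, rfl⟩)
  exact le_antisymm h2 h1

lemma pvStep_eq (arr : List Int) (kn m : Nat) (T : Int) (hkn : 1 ≤ kn) (hm : m < arr.length) :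
    pvStep arr kn (pvQS (fun j => arr.getD j 0) kn m, pvQS (fun j => -(arr.getD j 0)) kn m, T) m
      = (pvQS (fun j => arr.getD j 0) kn (m+1), pvQS (fun j => -(arr.getD j 0)) kn (m+1),
         if kn - 1 ≤ m then
           T + (((PySem.List.min? ((arr.drop (m + 1 - kn)).take kn) (fun x => x)).getD 0)
              + ((PySem.List.max? ((arr.drop (m + 1 - kn)).take kn) (fun x => x)).getD 0))
         else T) := by
  have hx1 : pvPopWhile (fun j => decide (arr.getD j 0 ≤ arr.getD m 0))
        (pvQS (fun j => arr.getD j 0) kn m)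
      = (pvQS (fun j => arr.getD j 0) kn m).filter (fun j => decide (arr.getD m 0 < arr.getD j 0)) :=
    popWhile_eq_filter (fun j => arr.getD j 0) (arr.getD m 0) _
      ((pairwise_pvQS _ kn m).imp (fun h => h.2))
  have hpred : (fun j => decide (arr.getD m 0 ≤ arr.getD j 0))
      = (fun j => decide (-(arr.getD j 0) ≤ -(arr.getD m 0))) := by
    funext j; rw [decide_eq_decide]; omega
  have hn1 : pvPopWhile (fun j => decide (-(arr.getD j 0) ≤ -(arr.getD m 0)))
        (pvQS (fun j => -(arr.getD j 0)) kn m)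
      = (pvQS (fun j => -(arr.getD j 0)) kn m).filter (fun j => decide (-(arr.getD m 0) < -(arr.getD j 0))) :=
    popWhile_eq_filter (fun j => -(arr.getD j 0)) (-(arr.getD m 0)) _
      ((pairwise_pvQS _ kn m).imp (fun h => h.2))
  have hx2 := push_pvQS (fun j => arr.getD j 0) kn m
  have hn2 := push_pvQS (fun j => -(arr.getD j 0)) kn m
  have hx3 := expire_pvQS (fun j => arr.getD j 0) kn m hkn
  have hn3 := expire_pvQS (fun j => -(arr.getD j 0)) kn m hkn
  simp only [pvStep, hpred, hx1, hn1]
  rw [hx2, hn2, hx3, hn3]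
  refine Prod.ext rfl (Prod.ext rfl ?_)
  simp only
  by_cases h : kn - 1 ≤ m
  · rw [if_pos h, if_pos h]
    rw [min_window_eq arr kn (m+1) hkn (by omega) (by omega),
        max_window_eq arr kn (m+1) hkn (by omega) (by omega)]
  · rw [if_neg h, if_neg h]

lemma loop_inv (arr : List Int) (kn : Nat) (hkn : 1 ≤ kn) :
    ∀ m, m ≤ arr.length →
      (List.range m).foldl (pvStep arr kn) ([], [], 0)
        = (pvQS (fun j => arr.getD j 0) kn m, pvQS (fun j => -(arr.getD j 0)) kn m, pvT arr kn m) := by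
  intro m
  induction m with
  | zero =>
    intro _
    have h0 : ∀ f : Nat → Int, pvQS f kn 0 = [] := by
      intro f; unfold pvQS; simp
    rw [List.range_zero, List.foldl_nil, h0, h0]
    unfold pvT
    have : 0 + 1 - kn = 0 := by omega
    rw [this]
    rfl
  | succ m ih =>
    intro hm
    rw [List.range_succ, List.foldl_append, ih (by omega)]
    simp only [List.foldl_cons, List.foldl_nil]
    rw [pvStep_eq arr kn m _ hkn (by omega)]
    refine Prod.ext rfl (Prod.ext rfl ?_)
    simp only
    by_cases h : kn - 1 ≤ m
    · rw [if_pos h]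
      unfold pvT
      have h1 : m + 1 + 1 - kn = (m + 1 - kn) + 1 := by omega
      rw [h1, List.range_succ, List.map_append, List.sum_append]
      simp
    · rw [if_neg h]
      unfold pvT
      have h1 : m + 1 + 1 - kn = 0 := by omega
      have h2 : m + 1 - kn = 0 := by omega
      rw [h1, h2]

lemma main_equiv (arr : List Int) (k : Int) (hk : 1 ≤ k) :
    sum_min_max_windows arr k = sum_min_max_windows_alt arr k := by
  by_cases hnk : (arr.length : Int) < k
  · unfold sum_min_max_windows sum_min_max_windows_alt
    rw [if_pos hnk, if_pos (Or.inr hnk)]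
  · have hkk : k = ((k.toNat : Nat) : Int) := (Int.toNat_of_nonneg (by omega)).symm
    set kn := k.toNat with hkn
    have hkn1 : 1 ≤ kn := by omega
    have hknlen : kn ≤ arr.length := by omega
    unfold sum_min_max_windows sum_min_max_windows_alt
    rw [if_neg hnk, if_neg (by push Not; exact ⟨by omega, by omega⟩)]
    rw [loop_inv arr kn hkn1 arr.length le_rfl]
    simp only
    rw [PySem.List.pyRange_one, List.foldl_map, PySem.List.foldl_add, zero_add]
    have hN : ((arr.length : Int) - k + 1 - 0).toNat = arr.length + 1 - kn := by omega
    rw [hN]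
    unfold pvT
    refine congrArg _ (List.map_congr_left ?_)
    intro t _
    have h0 : (0 : Int) + (t : Int) = (t : Int) := by omega
    rw [h0, hkk, PySem.List.slice_natCast_add]

-- ===== VERDICT (by name: the statement is the Claim_ definition above) =====
theorem sum_min_max_windows_spec : Claim_equal_sum_min_max_windows := by
  intro arr k _ hk
  unfold Spec_sum_min_max_windows
  exact main_equiv arr k hk
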